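-- pv_equiv track=rewrite | github.com/janduplessis883/AutoNote | autonote.py | nlp_basic_cleaning
-- ===== SOURCE A (Python) =====
-- def nlp_basic_cleaning(sentence):
--     import string
--
--     sentence = ''.join(char for char in sentence if not char.isdigit())
--
--     for punctuation in string.punctuation:
--         sentence = sentence.replace(punctuation, '')
--
--     sentence = sentence.lower()
--     sentence = sentence.strip()
--     return sentence
-- ===== SOURCE B (Python) =====
-- def nlp_basic_cleaning(sentence):
--     import string
--     bad = set(string.punctuation)
--     cleaned = ''.join(c for c in sentence if not c.isdigit() and c not in bad)
--     return cleaned.lower().strip()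
-- ===== Notes on version B (the rewrite author's own statement) =====
-- stated objective: simpler
-- what changed: Replaces A's digit-filter pass followed by 32 separate full-string .replace() scans (one per punctuation character) with a single filtering pass over the string testing membership in a precomputed punctuation set, then lower/strip.
import Mathlib
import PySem

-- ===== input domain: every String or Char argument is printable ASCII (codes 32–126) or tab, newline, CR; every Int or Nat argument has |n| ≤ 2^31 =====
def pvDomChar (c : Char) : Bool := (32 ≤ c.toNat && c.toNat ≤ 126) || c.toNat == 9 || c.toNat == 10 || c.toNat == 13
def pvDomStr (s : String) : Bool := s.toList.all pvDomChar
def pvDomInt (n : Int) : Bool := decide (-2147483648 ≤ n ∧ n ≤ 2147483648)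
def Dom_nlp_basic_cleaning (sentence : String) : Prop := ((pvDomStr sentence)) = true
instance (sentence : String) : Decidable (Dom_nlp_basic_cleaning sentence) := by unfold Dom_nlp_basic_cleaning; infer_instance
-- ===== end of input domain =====

-- B replaces A's digit-filter pass plus 32 per-punctuation-character full-string replace() scans
-- with one filtering pass testing membership in a precomputed punctuation set (objective: simpler).
set_option maxRecDepth 8000
set_option maxHeartbeats 1000000


-- string.punctuation
def pvPunct : String := "!\"#$%&'()*+,-./:;<=>?@[\\]^_`{|}~"

-- ===== PORT A =====
-- ''.join(char for char in sentence if not char.isdigit()); then one replace(p, '') per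
-- punctuation character; then .lower(); then .strip()
def nlp_basic_cleaning (sentence : String) : String :=
  let s1 : String := String.ofList (sentence.toList.filter (fun c => !(PySem.Chars.isdigit c)))
  let s2 : String := pvPunct.toList.foldl (fun acc p => PySem.Str.replace acc (String.ofList [p]) "") s1
  let s3 : String := PySem.Str.lower s2
  PySem.Str.strip s3

-- ===== PORT B =====
-- bad = set(string.punctuation); one filtering pass; then .lower().strip()
def nlp_basic_cleaning_alt (sentence : String) : String :=
  let bad : PySem.Set Char := PySem.Set.ofList pvPunct.toList
  let cleaned : String :=
    String.ofList (sentence.toList.filter (fun c => !(PySem.Chars.isdigit c) && !(bad.contains c)))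
  PySem.Str.strip (PySem.Str.lower cleaned)

-- ===== PRECONDITION & SPEC =====
def Spec_nlp_basic_cleaning (sentence : String) (out : String) : Prop := out = nlp_basic_cleaning_alt sentence
instance (sentence : String) (out : String) : Decidable (Spec_nlp_basic_cleaning sentence out) := by unfold Spec_nlp_basic_cleaning; infer_instance

-- ===== CLAIM (what is proved, stated in full; the proofs are below) =====
def Claim_equal_nlp_basic_cleaning : Prop := ∀ (sentence : String), Dom_nlp_basic_cleaning sentence → Spec_nlp_basic_cleaning sentence (nlp_basic_cleaning sentence)

-- ===== LEMMAS AND PROOFS =====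

-- replace.go for a single-character pattern and empty replacement just deletes that character
theorem pv_go_single (p : Char) (l acc : List Char) (fuel : Nat) (h : l.length ≤ fuel) :
    PySem.Chars.replace.go [p] [] fuel l acc = acc.reverse ++ l.filter (fun c => c != p) := by
  induction l generalizing fuel acc with
  | nil =>
      cases fuel <;> rw [PySem.Chars.replace.go.eq_def] <;> simp
  | cons c t ih =>
      cases fuel with
      | zero => simp at h
      | succ fuel =>
        rw [PySem.Chars.replace.go.eq_def]
        simp only [List.length_cons, Nat.succ_le_succ_iff] at h
        by_cases hc : c = p
        · have hpre : List.isPrefixOf [p] (c :: t) = true := by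
            simp [List.isPrefixOf, hc]
          simp only [hpre, if_true]
          rw [show List.drop (List.length [p]) (c :: t) = t from rfl]
          rw [ih ([].reverse ++ acc) fuel h]
          simp [hc]
        · have hpre : List.isPrefixOf [p] (c :: t) = false := by
            simp [List.isPrefixOf]
            exact fun hh => (hc hh.symm).elim
          simp only [hpre, if_false, Bool.false_eq_true]
          rw [ih (c :: acc) fuel h]
          simp [hc]

theorem pv_replace_single (p : Char) (l : List Char) :
    PySem.Chars.replace l [p] [] = l.filter (fun c => c != p) := by
  rw [PySem.Chars.replace]
  simp only [List.isEmpty_cons, if_false, Bool.false_eq_true]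
  rw [pv_go_single p l [] l.length (le_refl _)]
  simp

-- folding single-character replaces over a list of characters filters out all of them
theorem pv_foldl_replace (ps : List Char) (s : String) :
    (ps.foldl (fun acc p => PySem.Str.replace acc (String.ofList [p]) "") s).toList
      = s.toList.filter (fun c => !(ps.contains c)) := by
  induction ps generalizing s with
  | nil => simp
  | cons p ps ih =>
      simp only [List.foldl_cons]
      rw [ih]
      have hr : (PySem.Str.replace s (String.ofList [p]) "").toList = s.toList.filter (fun c => c != p) := by
        rw [PySem.Str.toList_replace]
        rw [show (String.ofList [p]).toList = [p] from String.toList_ofList]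
        rw [show ("" : String).toList = [] from rfl]
        exact pv_replace_single p s.toList
      rw [hr, List.filter_filter]
      apply List.filter_congr
      intro c _
      have hb : (c != p) = !decide (p = c) := by
        by_cases h : p = c
        · subst h; simp
        · simp [bne_iff_ne, Ne.symm h, h]
      rw [hb, Bool.and_comm]
      by_cases h : p = c
      · simp [h]
      · simp [h]
        exact fun _ => Ne.symm h

-- ===== VERDICT (by name: the statement is the Claim_ definition above) =====
-- the two cleaned strings agree before lower/strip
theorem pv_mid (sentence : String) :
    (pvPunct.toList.foldl (fun acc p => PySem.Str.replace acc (String.ofList [p]) "")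
        (String.ofList (sentence.toList.filter (fun c => !(PySem.Chars.isdigit c))))).toList
      = sentence.toList.filter
          (fun c => !(PySem.Chars.isdigit c) && !((PySem.Set.ofList pvPunct.toList).contains c)) := by
  rw [pv_foldl_replace]
  simp only [String.toList_ofList, List.filter_filter]
  apply List.filter_congr
  intro c _
  have hc : (PySem.Set.ofList pvPunct.toList).contains c = pvPunct.toList.contains c := by
    simp only [PySem.Set.contains]
    apply Bool.eq_iff_iff.mpr
    simp [PySem.Set.mem_ofList]
  rw [hc, Bool.and_comm]

theorem nlp_basic_cleaning_spec : Claim_equal_nlp_basic_cleaning := by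
  intro sentence _
  simp only [Spec_nlp_basic_cleaning, nlp_basic_cleaning, nlp_basic_cleaning_alt]
  apply String.toList_inj.mp
  simp only [PySem.Str.toList_strip, PySem.Str.toList_lower]
  rw [pv_mid sentence, String.toList_ofList]
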